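-- pv_equiv track=rewrite | github.com/aleksgorica/number-theory | hard.py | splitable
-- ===== SOURCE A (Python) =====
-- def splitable(nterica, idx):
--     if (nterica[idx] == 0):
--         return False
--     if (nterica[idx] == 1):
--         for i in range(len(nterica)):
--             if i == idx: continue
--             if nterica[idx] != 0: return True
--         return False
--     return True
-- ===== SOURCE B (Python) =====
-- def splitable(nterica, idx):
--     v = nterica[idx]
--     if v == 0:
--         return False
--     if v == 1:
--         return len(nterica) > 1
--     return True
-- ===== Notes on version B (the rewrite author's own statement) =====
-- stated objective: simpler
-- what changed: Replaced the whole scan over range(len(nterica)) (which returns True at the first index other than idx, since its body re-tests nterica[idx]) by the closed form len(nterica) > 1.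
-- intended difference: On the single input ([1], -1) (v == 1, negative index into a one-element list) A returns True because the loop's 'i == idx' skip never fires for a negative idx, while B returns False, the intended answer since there is no other element to split off. — e.g. on splitable([1], -1): A returns true, B returns false
import Mathlib
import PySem

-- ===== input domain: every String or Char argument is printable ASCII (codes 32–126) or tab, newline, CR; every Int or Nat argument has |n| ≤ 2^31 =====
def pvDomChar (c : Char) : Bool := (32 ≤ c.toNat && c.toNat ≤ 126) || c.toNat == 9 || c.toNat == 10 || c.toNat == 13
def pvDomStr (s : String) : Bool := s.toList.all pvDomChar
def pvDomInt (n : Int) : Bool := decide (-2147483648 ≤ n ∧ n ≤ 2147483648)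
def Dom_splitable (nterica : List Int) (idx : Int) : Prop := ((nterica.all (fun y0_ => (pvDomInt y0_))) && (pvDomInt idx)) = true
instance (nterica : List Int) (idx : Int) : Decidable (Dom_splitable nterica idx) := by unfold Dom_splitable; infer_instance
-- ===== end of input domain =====

-- B replaces A's scan over range(len(nterica)) by the closed form len(nterica) > 1 (simpler);
-- on ([1], -1) A returns True by an accident of its 'i == idx' skip and B returns the intended False.


-- ===== PORT A =====
-- the 'for i in range(len(nterica))' loop: skip i == idx, else test nterica[idx] != 0 and return True
def splitableLoop (nterica : List Int) (idx : Int) : List Int → Bool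
  | [] => false
  | i :: rest =>
    if i == idx then splitableLoop nterica idx rest
    else if (PySem.List.pyGet? nterica idx).getD 0 ≠ 0 then true
    else splitableLoop nterica idx rest

def splitable (nterica : List Int) (idx : Int) : Bool :=
  match PySem.List.pyGet? nterica idx with
  | none => false   -- IndexError; excluded by Pre_splitable
  | some v =>
    if v == 0 then false
    else if v == 1 then
      splitableLoop nterica idx (PySem.List.pyRange 0 nterica.length 1)
    else true

-- ===== PORT B =====
def splitable_alt (nterica : List Int) (idx : Int) : Bool :=
  match PySem.List.pyGet? nterica idx with
  | none => false   -- IndexError; excluded by Pre_splitable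
  | some v =>
    if v == 0 then false
    else if v == 1 then decide (1 < nterica.length)
    else true

-- ===== PRECONDITION & SPEC =====
-- A raises IndexError when idx is out of range; exactly those inputs are excluded.
def Pre_splitable (nterica : List Int) (idx : Int) : Prop :=
  PySem.Raise.InRange nterica.length idx
instance (nterica : List Int) (idx : Int) : Decidable (Pre_splitable nterica idx) := by unfold Pre_splitable; infer_instance
def pvWitness_splitable : List Int × Int := ([1, 2, 0], 1)

-- On ([1], -1) (value 1 at a negative index into a one-element list) A returns True because its
-- 'i == idx' skip never fires for a negative idx, while B returns the intended False: there is
-- no other element to split off.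
def D_splitable (nterica : List Int) (idx : Int) : Prop := nterica = [1] ∧ idx = -1
instance (nterica : List Int) (idx : Int) : Decidable (D_splitable nterica idx) := by unfold D_splitable; infer_instance

def Spec_splitable (nterica : List Int) (idx : Int) (out : Bool) : Prop :=
  ¬ D_splitable nterica idx → out = splitable_alt nterica idx
instance (nterica : List Int) (idx : Int) (out : Bool) : Decidable (Spec_splitable nterica idx out) := by unfold Spec_splitable; infer_instance

def pvDiffWitness_splitable : List Int × Int := ([1], -1)
def pvDiffWitnessOut_splitable : Bool × Bool := (true, false)

-- ===== CLAIM (what is proved, stated in full; the proofs are below) =====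
def Claim_unchanged_splitable : Prop := ∀ (nterica : List Int) (idx : Int), Dom_splitable nterica idx → Pre_splitable nterica idx → Spec_splitable nterica idx (splitable nterica idx)
def Claim_changed_splitable : Prop := Dom_splitable (pvDiffWitness_splitable.1) (pvDiffWitness_splitable.2) ∧ Pre_splitable (pvDiffWitness_splitable.1) (pvDiffWitness_splitable.2) ∧ D_splitable (pvDiffWitness_splitable.1) (pvDiffWitness_splitable.2) ∧ splitable (pvDiffWitness_splitable.1) (pvDiffWitness_splitable.2) = pvDiffWitnessOut_splitable.1 ∧ splitable_alt (pvDiffWitness_splitable.1) (pvDiffWitness_splitable.2) = pvDiffWitnessOut_splitable.2 ∧ pvDiffWitnessOut_splitable.1 ≠ pvDiffWitnessOut_splitable.2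
def Claim_exact_splitable : Prop := ∀ (nterica : List Int) (idx : Int), Dom_splitable nterica idx → Pre_splitable nterica idx → D_splitable nterica idx → splitable nterica idx ≠ splitable_alt nterica idx

-- ===== LEMMAS AND PROOFS =====

-- when nterica[idx] is some nonzero value, the loop returns True iff some i in the list differs from idx
theorem splitableLoop_eq_any (nterica : List Int) (idx : Int) (v : Int)
    (hget : PySem.List.pyGet? nterica idx = some v) (hv : v ≠ 0) :
    ∀ l : List Int, splitableLoop nterica idx l = l.any (fun i => i != idx) := by
  intro l
  induction l with
  | nil => rfl
  | cons i rest ih =>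
    simp only [splitableLoop, List.any_cons, hget, Option.getD_some]
    by_cases h : i = idx
    · simp [h, ih]
    · simp [h, hv]

theorem splitable_spec : Claim_unchanged_splitable := by
  intro nterica idx _ hpre hnd
  unfold Pre_splitable PySem.Raise.InRange at hpre
  unfold splitable splitable_alt
  have hlen : 0 < nterica.length := by omega
  obtain ⟨v, hget⟩ : ∃ v, PySem.List.pyGet? nterica idx = some v := by
    rcases h : PySem.List.pyGet? nterica idx with _ | v
    · rw [PySem.List.pyGet?_eq_none_iff] at h
      exact absurd (by unfold PySem.Raise.InRange; omega) h
    · exact ⟨v, rfl⟩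
  rw [hget]
  by_cases h0 : v = 0
  · simp [h0]
  · by_cases h1 : v = 1
    · subst h1
      have hloop : splitableLoop nterica idx (PySem.List.pyRange 0 nterica.length 1)
          = (PySem.List.pyRange 0 nterica.length 1).any (fun i => i != idx) :=
        splitableLoop_eq_any nterica idx 1 hget h0 _
      by_cases hbig : 1 < nterica.length
      · -- the range contains both 0 and 1; one of them differs from idx
        have hex : ∃ i ∈ PySem.List.pyRange 0 nterica.length 1, i ≠ idx := by
          by_cases hz : idx = 0
          · exact ⟨1, by rw [PySem.List.mem_pyRange_one]; omega, by omega⟩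
          · exact ⟨0, by rw [PySem.List.mem_pyRange_one]; omega, by omega⟩
        obtain ⟨i, hi, hne⟩ := hex
        have hany : (PySem.List.pyRange 0 nterica.length 1).any (fun i => i != idx) = true :=
          List.any_eq_true.mpr ⟨i, hi, by simpa using hne⟩
        simp [hloop, hany, hbig]
      · -- length = 1, so nterica = [v] = [1]; idx ∈ {-1, 0}, and idx = -1 is excluded by D_
        have hlen1 : nterica.length = 1 := by omega
        have hidx : idx = 0 := by
          rcases (by omega : idx = 0 ∨ idx = -1) with h | h
          · exact h
          · exfalso
            apply hnd
            subst h
            obtain ⟨x, hx⟩ : ∃ x, nterica = [x] := by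
              cases nterica with
              | nil => simp at hlen1
              | cons a t => cases t with
                | nil => exact ⟨a, rfl⟩
                | cons b t' => simp at hlen1
            subst hx
            have : x = 1 := by simpa [PySem.List.pyGet?_neg_one] using hget
            exact ⟨by rw [this], rfl⟩
        subst hidx
        simp [hlen1, PySem.List.pyRange_one, splitableLoop]
    · simp [h0, h1]

-- ===== VERDICT (by name: the statement is the Claim_ definition above) =====
theorem splitable_changed : Claim_changed_splitable := by
  unfold Claim_changed_splitable; decide

theorem splitable_tight : Claim_exact_splitable := by
  intro nterica idx _ _ hd
  obtain ⟨h1, h2⟩ := hd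
  subst h1; subst h2
  decide
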